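-- pv_equiv track=rewrite | github.com/sergeii/swat4stats | apps/tracker/aio_tasks/serverquery.py | _parse_status_payload
-- ===== SOURCE A (Python) =====
-- def _parse_status_payload(data: str) -> list[tuple[str, str]]:
--     """
--     Split a response payload into a list of key, value pairs.
--
--     :param data: Response payload
--     :return: List of (key, value) pairs
--     """
--     params = []
--     split = data.split("\\")
--     for i, key in enumerate(split):
--         # skip values
--         if not i % 2:
--             continue
--         try:
--             value = split[i + 1]
--         except IndexError:
--             pass
--         else:
--             params.append((key, value))
--     return params
-- ===== SOURCE B (Python) =====
-- def _parse_status_payload(data: str) -> list[tuple[str, str]]: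
--     """
--     Split a response payload into a list of key, value pairs.
--
--     Streaming parser: never builds the split list; repeatedly bites off the
--     next key and value with str.partition, stopping on a dangling key.
--     """
--     params = []
--     _, sep, rest = data.partition("\\")
--     while sep:
--         key, sep, rest = rest.partition("\\")
--         if not sep:
--             break  # dangling key without a value
--         value, sep, rest = rest.partition("\\")
--         params.append((key, value))
--     return params
-- ===== Notes on version B (the rewrite author's own statement) =====
-- stated objective: alternative
-- what changed: Replaces A's split-into-a-list + enumerate with parity skip + try/except lookahead by a streaming parser that never builds the split list: it repeatedly bites the next key and value off the remaining string with str.partition, stopping at a dangling key.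
import Mathlib
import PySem

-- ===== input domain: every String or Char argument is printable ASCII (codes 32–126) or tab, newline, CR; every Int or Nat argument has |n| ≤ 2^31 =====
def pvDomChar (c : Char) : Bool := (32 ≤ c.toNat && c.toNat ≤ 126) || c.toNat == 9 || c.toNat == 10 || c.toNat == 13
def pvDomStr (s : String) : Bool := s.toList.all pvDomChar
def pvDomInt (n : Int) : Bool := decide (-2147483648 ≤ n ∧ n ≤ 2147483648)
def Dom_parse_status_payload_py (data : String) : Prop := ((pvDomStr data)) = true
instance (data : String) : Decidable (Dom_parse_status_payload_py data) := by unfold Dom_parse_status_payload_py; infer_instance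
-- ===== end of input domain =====

-- B replaces A's split-list + enumerate/parity/try-except indexing with a streaming parser that
-- repeatedly bites the next key and value off the remaining string with str.partition; objective: alternative.

-- ===== PORT A =====
def parse_status_payload_py (data : String) : List (String × String) :=
  let split := (PySem.Str.split? data "\\").getD []   -- sep is nonempty, so split? is some
  (PySem.List.enumerate split 0).foldl
    (fun (params : List (String × String)) (x : Int × String) =>
      if x.1 % 2 == 0 then params                      -- skip values
      else
        match PySem.List.pyGet? split (x.1 + 1) with   -- try: value = split[i+1] except IndexError: pass
        | none => params
        | some value => params ++ [(x.2, value)])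
    []

-- ===== PORT B =====
-- str.partition("\\") has no PySem primitive; ported by hand, exact for this single-char separator:
-- (text before the first backslash, whether one was found, text after it).
def pvPartition : List Char → List Char × Bool × List Char
  | [] => ([], false, [])
  | c :: t =>
    if c = '\\' then ([], true, t)
    else
      let r := pvPartition t
      (c :: r.1, r.2.1, r.2.2)

-- termination helper for the loop below (cited by name in decreasing_by)
theorem pvPartition_len : ∀ (l : List Char),
    (pvPartition l).2.2.length ≤ l.length ∧
    ((pvPartition l).2.1 = true → (pvPartition l).2.2.length < l.length) := by
  intro l
  induction l with
  | nil => simp [pvPartition]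
  | cons c t ih =>
    by_cases h : c = '\\'
    · simp [pvPartition, h]
    · simp only [pvPartition, if_neg h]
      exact ⟨Nat.le_succ_of_le ih.1, fun hs => Nat.lt_succ_of_lt (ih.2 hs)⟩

-- the 'while sep:' loop of B, on the state (sep, rest, params)
def pvPairsLoop (sep : Bool) (rest : List Char) (params : List (String × String)) :
    List (String × String) :=
  if sep then
    let p := pvPartition rest
    if p.2.1 = false then params                       -- dangling key without a value
    else
      let q := pvPartition p.2.2
      pvPairsLoop q.2.1 q.2.2 (params ++ [(String.ofList p.1, String.ofList q.1)])
  else params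
termination_by rest.length
decreasing_by
  exact Nat.lt_of_le_of_lt (pvPartition_len (pvPartition rest).2.2).1
    ((pvPartition_len rest).2 (by simpa using ‹¬(pvPartition rest).2.1 = false›))

def parse_status_payload_py_alt (data : String) : List (String × String) :=
  let p := pvPartition data.toList                     -- _, sep, rest = data.partition("\\")
  pvPairsLoop p.2.1 p.2.2 []

-- ===== PRECONDITION & SPEC =====
def Spec_parse_status_payload_py (data : String) (out : List (String × String)) : Prop := out = parse_status_payload_py_alt data
instance (data : String) (out : List (String × String)) : Decidable (Spec_parse_status_payload_py data out) := by unfold Spec_parse_status_payload_py; infer_instance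

-- ===== CLAIM (what is proved, stated in full; the proofs are below) =====
def Claim_equal_parse_status_payload_py : Prop := ∀ (data : String), Dom_parse_status_payload_py data → Spec_parse_status_payload_py data (parse_status_payload_py data)

-- ===== LEMMAS AND PROOFS =====

-- consecutive pairing of the split pieces: the common normal form both programs are reduced to
def pvPairUp : List String → List (String × String)
  | k :: v :: rest => (k, v) :: pvPairUp rest
  | _ => []

-- (head piece, remaining pieces) of splitting on '\\', defined through pvPartition
def pvSplitC (l : List Char) : List Char × List (List Char) :=
  let p := pvPartition l
  if p.2.1 then (p.1, (pvSplitC p.2.2).1 :: (pvSplitC p.2.2).2) else (l, [])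
termination_by l.length
decreasing_by exact (pvPartition_len l).2 (by simpa using ‹_›)

theorem pvPartition_not_found (l : List Char) (h : (pvPartition l).2.1 = false) :
    (pvPartition l).1 = l := by
  induction l with
  | nil => simp [pvPartition]
  | cons c t ih =>
    by_cases hc : c = '\\'
    · simp [pvPartition, hc] at h
    · simp only [pvPartition, if_neg hc] at h ⊢
      simpa using ih h

theorem pvSplitC_eq (l : List Char) :
    pvSplitC l
      = if (pvPartition l).2.1
          then ((pvPartition l).1,
                (pvSplitC (pvPartition l).2.2).1 :: (pvSplitC (pvPartition l).2.2).2)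
          else (l, []) := by
  rw [pvSplitC]

theorem pvSplitC_cons (a : Char) (t : List Char) (ha : ¬ a = '\\') :
    pvSplitC (a :: t) = (a :: (pvSplitC t).1, (pvSplitC t).2) := by
  rw [pvSplitC_eq (a :: t), pvSplitC_eq t]
  simp only [pvPartition, if_neg ha]
  by_cases hs : (pvPartition t).2.1 <;> simp [hs]

theorem pvPairsLoop_false (rest : List Char) (params : List (String × String)) :
    pvPairsLoop false rest params = params := by
  rw [pvPairsLoop]
  simp

theorem pvPairsLoop_true (rest : List Char) (params : List (String × String)) :
    pvPairsLoop true rest params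
      = if (pvPartition rest).2.1 = false then params
        else pvPairsLoop (pvPartition (pvPartition rest).2.2).2.1
               (pvPartition (pvPartition rest).2.2).2.2
               (params ++ [(String.ofList (pvPartition rest).1,
                            String.ofList (pvPartition (pvPartition rest).2.2).1)]) := by
  rw [pvPairsLoop]
  simp

-- splitOn's fueled worker, characterised against pvSplitC
theorem pv_go_spec : ∀ (l : List Char) (fuel : Nat) (cur : List Char) (acc : List (List Char)),
    l.length < fuel →
    PySem.Chars.splitOn.go ['\\'] fuel l cur acc
      = acc.reverse ++ (cur.reverse ++ (pvSplitC l).1) :: (pvSplitC l).2 := by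
  intro l
  induction l with
  | nil =>
    intro fuel cur acc hf
    obtain ⟨f, rfl⟩ : ∃ f, fuel = f + 1 := ⟨fuel - 1, by omega⟩
    simp [PySem.Chars.splitOn.go, pvSplitC, pvPartition]
  | cons a t ih =>
    intro fuel cur acc hf
    obtain ⟨f, rfl⟩ : ∃ f, fuel = f + 1 := ⟨fuel - 1, by omega⟩
    have hflt : t.length < f := by simpa using Nat.lt_of_succ_lt_succ hf
    by_cases ha : a = '\\'
    · subst ha
      rw [PySem.Chars.splitOn.go]
      rw [show ((['\\'] : List Char).isPrefixOf ('\\' :: t)) = true from by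
        simp [List.isPrefixOf]]
      simp only [if_true, List.length_cons, List.length_nil, List.drop_succ_cons, List.drop_zero]
      rw [ih f [] (cur.reverse :: acc) hflt]
      rw [pvSplitC_eq ('\\' :: t)]
      simp [pvPartition]
    · rw [PySem.Chars.splitOn.go]
      rw [show ((['\\'] : List Char).isPrefixOf (a :: t)) = false from by
        simp [List.isPrefixOf]; exact fun h => (ha h.symm).elim]
      simp only [Bool.false_eq_true, if_false]
      rw [ih f (a :: cur) acc hflt]
      rw [pvSplitC_cons a t ha]
      simp

theorem pv_split_eq (l : List Char) :
    PySem.Chars.splitOn l ['\\'] = (pvSplitC l).1 :: (pvSplitC l).2 := by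
  rw [PySem.Chars.splitOn]
  simpa using pv_go_spec l (l.length + 1) [] [] (by omega)

-- Loop invariant for A's fold (unchanged from the A-side analysis): the fold over the suffix of L
-- starting at index n appends exactly the consecutive pairs of that suffix.
theorem pv_aux (L : List String) (d : List String) : ∀ (n : Nat) (acc : List (String × String)),
    L.drop n = d →
    (PySem.List.enumerate d (n : Int)).foldl
      (fun params x =>
        if x.1 % 2 == 0 then params
        else
          match PySem.List.pyGet? L (x.1 + 1) with
          | none => params
          | some value => params ++ [(x.2, value)]) acc
    = acc ++ (if n % 2 = 0 then pvPairUp d.tail else pvPairUp d) := by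
  induction d with
  | nil => intro n acc _; simp [PySem.List.enumerate, pvPairUp]
  | cons x t ih =>
    intro n acc hdrop
    have ht : L.drop (n + 1) = t := by
      have := congrArg List.tail hdrop
      simpa [List.tail_drop] using this
    have hget : PySem.List.pyGet? L ((n : Int) + 1) = L[n + 1]? := by
      have : ((n : Int) + 1) = ((n + 1 : Nat) : Int) := by push_cast; ring
      rw [this, PySem.List.pyGet?_natCast]
    have hhead : L[n + 1]? = t.head? := by
      rw [← List.head?_drop, ht]
    have hcast : ((n : Int) % 2) = ((n % 2 : Nat) : Int) := by norm_cast
    have hpar : (((n : Int)) % 2 == 0) = decide (n % 2 = 0) := by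
      rw [hcast]
      rcases Nat.mod_two_eq_zero_or_one n with h | h <;> simp [h]
    rw [PySem.List.enumerate]
    simp only [List.foldl_cons, hpar, hget, hhead]
    by_cases hn : n % 2 = 0
    · -- index n is even: skip, continue on t at n+1 (odd)
      have hodd : ¬ (n + 1) % 2 = 0 := by omega
      rw [if_pos (by simp [hn])]
      have hrec := ih (n + 1) acc ht
      rw [if_neg hodd] at hrec
      push_cast at hrec ⊢
      rw [hrec, if_pos hn]
      rfl
    · -- index n is odd: it is a key; pair it with the head of t if any
      rw [if_neg (by simp [hn]), if_neg hn]
      cases t with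
      | nil => simp [PySem.List.enumerate, pvPairUp]
      | cons v t2 =>
        have heven : (n + 1) % 2 = 0 := by omega
        have hrec := ih (n + 1) (acc ++ [(x, v)]) ht
        rw [if_pos heven] at hrec
        push_cast at hrec ⊢
        simp only [List.head?_cons]
        rw [hrec]
        simp [pvPairUp]

-- B's loop, once entered, produces exactly the consecutive pairing of the remaining pieces
theorem pv_loop_eq : ∀ (n : Nat) (rest : List Char), rest.length ≤ n → ∀ (params : List (String × String)),
    pvPairsLoop true rest params
      = params ++ pvPairUp (List.map String.ofList ((pvSplitC rest).1 :: (pvSplitC rest).2)) := by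
  intro n
  induction n with
  | zero =>
    intro rest hr params
    have hrest : rest = [] := List.eq_nil_of_length_eq_zero (Nat.le_zero.mp hr)
    subst hrest
    rw [pvPairsLoop_true]
    simp [pvPartition, pvSplitC_eq, pvPairUp]
  | succ m ih =>
    intro rest hr params
    rw [pvPairsLoop_true]
    by_cases hs : (pvPartition rest).2.1 = false
    · rw [if_pos hs, pvSplitC_eq]
      simp [hs, pvPairUp]
    · rw [if_neg hs]
      have hs' : (pvPartition rest).2.1 = true := by simpa using hs
      have hlt : (pvPartition rest).2.2.length < rest.length := (pvPartition_len rest).2 hs'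
      rw [pvSplitC_eq rest]
      simp only [hs', if_true]
      by_cases hq : (pvPartition (pvPartition rest).2.2).2.1 = false
      · -- the value runs to the end of the payload; the loop then stops
        rw [hq, pvPairsLoop_false]
        rw [pvSplitC_eq (pvPartition rest).2.2]
        simp only [hq, Bool.false_eq_true, if_false]
        simp [pvPairUp, pvPartition_not_found _ hq]
      · have hq' : (pvPartition (pvPartition rest).2.2).2.1 = true := by simpa using hq
        rw [hq']
        have hlen : (pvPartition (pvPartition rest).2.2).2.2.length ≤ m :=
          Nat.le_of_lt_succ (Nat.lt_of_lt_of_le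
            (Nat.lt_of_le_of_lt (pvPartition_len (pvPartition rest).2.2).1 hlt) hr)
        rw [ih _ hlen]
        rw [pvSplitC_eq (pvPartition rest).2.2]
        simp only [hq', if_true]
        simp [pvPairUp]

-- ===== VERDICT (by name: the statement is the Claim_ definition above) =====
theorem parse_status_payload_py_spec : Claim_equal_parse_status_payload_py := by
  intro data _
  unfold Spec_parse_status_payload_py
  have hL : (PySem.Str.split? data "\\").getD []
      = List.map String.ofList ((pvSplitC data.toList).1 :: (pvSplitC data.toList).2) := by
    rw [PySem.Str.split?, PySem.Chars.split?]
    simp [pv_split_eq]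
  have hA : parse_status_payload_py data
      = pvPairUp (((PySem.Str.split? data "\\").getD []).tail) := by
    have h := pv_aux ((PySem.Str.split? data "\\").getD [])
      ((PySem.Str.split? data "\\").getD []) 0 [] rfl
    rw [if_pos (by norm_num)] at h
    simp only [List.nil_append] at h
    exact h
  have hB : parse_status_payload_py_alt data
      = pvPairsLoop (pvPartition data.toList).2.1 (pvPartition data.toList).2.2 [] := rfl
  rw [hA, hB, hL]
  by_cases hs : (pvPartition data.toList).2.1 = false
  · rw [hs, pvPairsLoop_false, pvSplitC_eq]
    simp [hs, pvPairUp]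
  · have hs' : (pvPartition data.toList).2.1 = true := by simpa using hs
    rw [hs', pv_loop_eq (pvPartition data.toList).2.2.length _ le_rfl []]
    rw [pvSplitC_eq data.toList]
    simp [hs']
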